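-- pv_equiv track=rewrite | github.com/bossjoker1/algorithm | pythonAlgorithm/Practice/ms02.py | solution
-- ===== SOURCE A (Python) =====
-- def solution(A, B):
--     n = len(A)
--     la, lb = list(A), list(B)
--     res = 0
--     for i in range(n):
--         for j in range(i+1, n+1):
--             ta, tb = sorted(la[i:j]), sorted(lb[i:j])
--             if ta == tb:
--                 res += 1
--
--     return res
-- ===== SOURCE B (Python) =====
-- def _upd(diff, x, delta, mism):
--     old = diff.get(x, 0)
--     new = old + delta
--     diff[x] = new
--     return mism + (0 if new == 0 else 1) - (0 if old == 0 else 1)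
--
--
-- def solution(A, B):
--     n, m = len(A), len(B)
--     res = 0
--     for i in range(n):
--         diff = {}
--         mism = 0
--         for j in range(i, n):
--             mism = _upd(diff, A[j], 1, mism)
--             if j < m:
--                 mism = _upd(diff, B[j], -1, mism)
--             if mism == 0:
--                 res += 1
--     return res
-- ===== Notes on version B (the rewrite author's own statement) =====
-- stated objective: faster
-- what changed: Replaces the per-pair slice-and-sort comparison by per-start incremental value-count-difference tracking with a mismatch counter, deciding each window in O(1).
import Mathlib
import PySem

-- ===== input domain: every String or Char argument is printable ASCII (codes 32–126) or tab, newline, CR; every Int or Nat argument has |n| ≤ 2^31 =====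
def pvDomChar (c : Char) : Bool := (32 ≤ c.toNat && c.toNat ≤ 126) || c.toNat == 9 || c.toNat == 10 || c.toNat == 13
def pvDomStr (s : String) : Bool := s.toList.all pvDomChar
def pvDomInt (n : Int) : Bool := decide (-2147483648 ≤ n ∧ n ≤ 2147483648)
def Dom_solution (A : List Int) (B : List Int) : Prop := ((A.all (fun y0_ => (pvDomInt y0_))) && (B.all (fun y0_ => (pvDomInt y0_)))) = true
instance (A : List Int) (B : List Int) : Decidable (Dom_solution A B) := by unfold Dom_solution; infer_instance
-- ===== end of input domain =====

-- B replaces A's sort-every-slice brute force by, per start index i, an incremental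
-- value-count-difference dict with a mismatch counter (objective: faster, asymptotically).

-- ===== PORT A =====
def solution (A : List Int) (B : List Int) : Int :=
  let n : Int := A.length
  let la := A
  let lb := B
  (PySem.List.pyRange 0 n 1).foldl (fun res i =>
    (PySem.List.pyRange (i + 1) (n + 1) 1).foldl (fun res j =>
      let ta := PySem.List.sorted (PySem.List.slice la (some i) (some j)) (fun x => x) false
      let tb := PySem.List.sorted (PySem.List.slice lb (some i) (some j)) (fun x => x) false
      if ta = tb then res + 1 else res) res) 0

-- ===== PORT B =====
-- helper _upd of Source B: bump diff[x] by delta, return the adjusted mismatch counter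
def pvUpd (diff : PySem.Dict Int Int) (x delta mism : Int) : PySem.Dict Int Int × Int :=
  let old := diff.getD x 0
  let nw := old + delta
  (diff.insert x nw, mism + (if nw = 0 then 0 else 1) - (if old = 0 then 0 else 1))

def solution_alt (A : List Int) (B : List Int) : Int :=
  let n : Int := A.length
  let m : Int := B.length
  (PySem.List.pyRange 0 n 1).foldl (fun res i =>
    ((PySem.List.pyRange i n 1).foldl (fun (st : PySem.Dict Int Int × Int × Int) j =>
      let p := pvUpd st.1 (PySem.List.pyGetD A j 0) 1 st.2.1
      let q := if j < m then pvUpd p.1 (PySem.List.pyGetD B j 0) (-1) p.2 else p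
      (q.1, q.2, if q.2 = 0 then st.2.2 + 1 else st.2.2))
      (PySem.Dict.empty, 0, res)).2.2) 0

-- ===== PRECONDITION & SPEC =====
def Spec_solution (A : List Int) (B : List Int) (out : Int) : Prop := out = solution_alt A B
instance (A : List Int) (B : List Int) (out : Int) : Decidable (Spec_solution A B out) := by unfold Spec_solution; infer_instance

-- ===== CLAIM (what is proved, stated in full; the proofs are below) =====
def Claim_equal_solution : Prop := ∀ (A : List Int) (B : List Int), Dom_solution A B → Spec_solution A B (solution A B)

-- ===== LEMMAS AND PROOFS =====

-- number of keys of d whose stored value is nonzero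
def pvZn (d : PySem.Dict Int Int) : Nat := d.keys.countP (fun k => decide (d.getD k 0 ≠ 0))

theorem pvCountP_update (l : List Int) (x : Int) (p p' : Int → Bool)
    (hnd : l.Nodup) (hx : x ∈ l) (hagree : ∀ k ∈ l, k ≠ x → p' k = p k) :
    l.countP p' + (p x).toNat = l.countP p + (p' x).toNat := by
  induction l with
  | nil => cases hx
  | cons h t ih =>
    simp only [List.countP_cons]
    rcases List.mem_cons.mp hx with rfl | hxt
    · have hagree' : ∀ k ∈ t, p' k = p k := by
        intro k hk
        exact hagree k (List.mem_cons_of_mem _ hk) (fun hkx => (List.nodup_cons.mp hnd).1 (hkx ▸ hk))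
      have hcc : t.countP p' = t.countP p := List.countP_congr (fun k hk => by rw [hagree' k hk])
      rw [hcc]; cases hp : p x <;> cases hp' : p' x <;> simp_all [Bool.toNat]
    · have hhx : h ≠ x := fun hhx => (List.nodup_cons.mp hnd).1 (hhx ▸ hxt)
      have hph : p' h = p h := hagree h (List.mem_cons_self) hhx
      have := ih (List.nodup_cons.mp hnd).2 hxt
        (fun k hk hkx => hagree k (List.mem_cons_of_mem _ hk) hkx)
      rw [hph]
      cases p h <;> simp <;> omega

theorem pvZn_insert (d : PySem.Dict Int Int) (hnd : d.keys.Nodup) (x nw : Int) :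
    (pvZn (d.insert x nw) : Int) =
      (pvZn d : Int) + (if nw = 0 then 0 else 1) - (if d.getD x 0 = 0 then 0 else 1) := by
  have hgi : ∀ k : Int, (d.insert x nw).getD k 0 = if k = x then nw else d.getD k 0 :=
    fun k => PySem.Dict.getD_insert d x k nw 0
  by_cases hc : d.contains x = true
  · have hk : (d.insert x nw).keys = d.keys := PySem.Dict.keys_insert_of_contains d nw hc
    have hxk : x ∈ d.keys := (PySem.Dict.contains_iff_mem_keys d x).mp hc
    have hmain := pvCountP_update d.keys x
      (fun k => decide (d.getD k 0 ≠ 0)) (fun k => decide ((d.insert x nw).getD k 0 ≠ 0))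
      hnd hxk (fun k _ hkx => by simp [hgi k, hkx])
    unfold pvZn
    rw [hk]
    have h1 : (d.insert x nw).getD x 0 = nw := by simp [hgi x]
    by_cases hnw : nw = 0 <;> by_cases hold : d.getD x 0 = 0 <;>
      simp [hnw, hold, h1] at hmain ⊢ <;> omega
  · have hc' : d.contains x = false := by simpa using hc
    have hk : (d.insert x nw).keys = d.keys ++ [x] :=
      PySem.Dict.keys_insert_of_not_contains d nw hc'
    have hxk : x ∉ d.keys := fun hm => by
      simp [(PySem.Dict.contains_iff_mem_keys d x).mpr hm] at hc'
    have hold : d.getD x 0 = 0 := PySem.Dict.getD_of_not_contains d 0 hc'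
    have hcong : d.keys.countP (fun k => decide ((d.insert x nw).getD k 0 ≠ 0))
        = d.keys.countP (fun k => decide (d.getD k 0 ≠ 0)) :=
      List.countP_congr (fun k hkm => by
        have hkx : k ≠ x := fun h => hxk (h ▸ hkm)
        simp [hgi k, hkx])
    unfold pvZn
    rw [hk, List.countP_append, hcong]
    have h1 : (d.insert x nw).getD x 0 = nw := by simp [hgi x]
    by_cases hnw : nw = 0 <;> simp [hnw, hold, h1]

theorem pvZn_zero_iff (d : PySem.Dict Int Int) :
    pvZn d = 0 ↔ ∀ v : Int, d.getD v 0 = 0 := by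
  unfold pvZn
  rw [List.countP_eq_zero]
  constructor
  · intro h v
    by_cases hv : v ∈ d.keys
    · have := h v hv; simpa using this
    · refine PySem.Dict.getD_of_not_contains d 0 ?_
      cases hcv : d.contains v with
      | false => rfl
      | true => exact absurd ((PySem.Dict.contains_iff_mem_keys d v).mp hcv) hv
  · intro h k _
    simp [h k]

theorem pvCount_take_succ (l : List Int) (b a : Nat) (v : Int) (hab : a ≤ b) (hb : b < l.length) :
    ((l.drop a).take (b + 1 - a)).count v
      = ((l.drop a).take (b - a)).count v + (if l[b] = v then 1 else 0) := by
  have hlen : b - a < (l.drop a).length := by simp [List.length_drop]; omega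
  have hidx : (l.drop a)[b - a]? = some l[b] := by
    rw [List.getElem?_drop]
    have hab : a + (b - a) = b := by omega
    rw [hab, List.getElem?_eq_getElem hb]
  have hsucc : b + 1 - a = (b - a) + 1 := by omega
  rw [hsucc, List.take_add_one, hidx]
  by_cases h : l[b] = v <;> simp [List.count_append, h]

theorem pvCount_take_stable (l : List Int) (b a : Nat) (v : Int) (hb : l.length ≤ b) :
    ((l.drop a).take (b + 1 - a)).count v = ((l.drop a).take (b - a)).count v := by
  have h2 : (l.drop a).length ≤ b - a := by simp; omega
  have h3 : (l.drop a).length ≤ b + 1 - a := by simp; omega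
  rw [List.take_of_length_le h3, List.take_of_length_le h2]


theorem pvUpd_getD (d : PySem.Dict Int Int) (x δ m v : Int) :
    (pvUpd d x δ m).1.getD v 0 = if v = x then d.getD x 0 + δ else d.getD v 0 := by
  simp only [pvUpd]
  exact PySem.Dict.getD_insert d x v (d.getD x 0 + δ) 0

theorem pvUpd_nodup (d : PySem.Dict Int Int) (x δ m : Int) (h : d.keys.Nodup) :
    (pvUpd d x δ m).1.keys.Nodup :=
  PySem.Dict.nodup_keys_insert d x _ h

theorem pvUpd_snd (d : PySem.Dict Int Int) (x δ m : Int) (hnd : d.keys.Nodup)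
    (hm : m = (pvZn d : Int)) :
    (pvUpd d x δ m).2 = (pvZn (pvUpd d x δ m).1 : Int) := by
  have h := pvZn_insert d hnd x (d.getD x 0 + δ)
  simp only [pvUpd]
  rw [h, hm]

-- loop invariant: d holds the per-value count difference of the two windows, m the
-- number of values on which they disagree
def pvInv (A B : List Int) (i k : Int) (d : PySem.Dict Int Int) (m : Int) : Prop :=
  d.keys.Nodup ∧
  (∀ v : Int, d.getD v 0 =
      ((PySem.List.slice A (some i) (some k)).count v : Int)
        - ((PySem.List.slice B (some i) (some k)).count v : Int)) ∧
  m = (pvZn d : Int)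

-- the inner-loop body of solution_alt, named for the proofs
def pvStepFn (A B : List Int) (st : PySem.Dict Int Int × Int × Int) (j : Int) :
    PySem.Dict Int Int × Int × Int :=
  let p := pvUpd st.1 (PySem.List.pyGetD A j 0) 1 st.2.1
  let q := if j < (B.length : Int) then pvUpd p.1 (PySem.List.pyGetD B j 0) (-1) p.2 else p
  (q.1, q.2, if q.2 = 0 then st.2.2 + 1 else st.2.2)

theorem pvStepFn_res (A B : List Int) (st : PySem.Dict Int Int × Int × Int) (j : Int) :
    (pvStepFn A B st j).2.2 = if (pvStepFn A B st j).2.1 = 0 then st.2.2 + 1 else st.2.2 := by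
  by_cases h : j < (B.length : Int) <;> simp [pvStepFn, h]

theorem pvSlice_succ (L : List Int) (i k v : Int) (h0 : 0 ≤ i) (hik : i ≤ k)
    (hk : k < (L.length : Int)) :
    (PySem.List.slice L (some i) (some (k + 1))).count v
      = (PySem.List.slice L (some i) (some k)).count v
          + (if PySem.List.pyGetD L k 0 = v then 1 else 0) := by
  have hk0 : (0 : Int) ≤ k := le_trans h0 hik
  rw [PySem.List.slice_toNat L h0 hk0, PySem.List.slice_toNat L h0 (by omega)]
  have ht : (k + 1).toNat = k.toNat + 1 := by omega
  rw [ht, PySem.List.pyGetD_eq_getElem L 0 hk0 hk]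
  exact pvCount_take_succ L k.toNat i.toNat v (by omega) (by omega)

theorem pvSlice_stable (L : List Int) (i k v : Int) (h0 : 0 ≤ i) (hik : i ≤ k)
    (hk : (L.length : Int) ≤ k) :
    (PySem.List.slice L (some i) (some (k + 1))).count v
      = (PySem.List.slice L (some i) (some k)).count v := by
  have hk0 : (0 : Int) ≤ k := le_trans h0 hik
  rw [PySem.List.slice_toNat L h0 hk0, PySem.List.slice_toNat L h0 (by omega)]
  have ht : (k + 1).toNat = k.toNat + 1 := by omega
  rw [ht]
  exact pvCount_take_stable L k.toNat i.toNat v (by omega)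

theorem pvInv_zero_iff (A B : List Int) (i k : Int) (d : PySem.Dict Int Int) (m : Int)
    (hinv : pvInv A B i k d m) :
    (m = 0) ↔
      (PySem.List.sorted (PySem.List.slice A (some i) (some k)) (fun x => x) false
        = PySem.List.sorted (PySem.List.slice B (some i) (some k)) (fun x => x) false) := by
  obtain ⟨hnd, hcnt, hm⟩ := hinv
  rw [PySem.List.sorted_id_eq_sorted_id_iff_perm, List.perm_iff_count, hm]
  constructor
  · intro h v
    have hz : pvZn d = 0 := by exact_mod_cast h
    have h0 := (pvZn_zero_iff d).mp hz v
    have h1 := hcnt v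
    omega
  · intro h
    have hz : pvZn d = 0 := (pvZn_zero_iff d).mpr (fun v => by have := hcnt v; have := h v; omega)
    exact_mod_cast congrArg (Nat.cast (R := Int)) hz

theorem pvStepFn_inv (A B : List Int) (i k : Int) (h0 : 0 ≤ i) (hik : i ≤ k)
    (hk : k < (A.length : Int)) (d : PySem.Dict Int Int) (m res : Int)
    (hinv : pvInv A B i k d m) :
    pvInv A B i (k + 1) (pvStepFn A B (d, m, res) k).1 (pvStepFn A B (d, m, res) k).2.1 := by
  obtain ⟨hnd, hcnt, hm⟩ := hinv
  by_cases hbm : k < (B.length : Int)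
  · simp only [pvStepFn, if_pos hbm]
    refine ⟨pvUpd_nodup _ _ _ _ (pvUpd_nodup _ _ _ _ hnd), ?_, ?_⟩
    · intro v
      rw [pvUpd_getD, pvUpd_getD, pvUpd_getD,
        pvSlice_succ A i k v h0 hik hk, pvSlice_succ B i k v h0 hik hbm]
      have hv := hcnt v
      have ha := hcnt (PySem.List.pyGetD A k 0)
      have hb := hcnt (PySem.List.pyGetD B k 0)
      push_cast
      push_cast at hv ha hb
      by_cases hvb : v = PySem.List.pyGetD B k 0
      · subst hvb
        by_cases hba : PySem.List.pyGetD B k 0 = PySem.List.pyGetD A k 0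
        · rw [hba] at hv hb ⊢
          split_ifs <;> omega
        · split_ifs <;> omega
      · by_cases hva : v = PySem.List.pyGetD A k 0
        · subst hva
          split_ifs <;> omega
        · split_ifs <;> omega
    · exact pvUpd_snd _ _ _ _ (pvUpd_nodup _ _ _ _ hnd) (pvUpd_snd _ _ _ _ hnd hm)
  · simp only [pvStepFn, if_neg hbm]
    refine ⟨pvUpd_nodup _ _ _ _ hnd, ?_, pvUpd_snd _ _ _ _ hnd hm⟩
    intro v
    rw [pvUpd_getD, pvSlice_succ A i k v h0 hik hk,
      pvSlice_stable B i k v h0 hik (by omega)]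
    have hv := hcnt v
    have ha := hcnt (PySem.List.pyGetD A k 0)
    push_cast
    push_cast at hv ha
    by_cases hva : v = PySem.List.pyGetD A k 0
    · subst hva
      split_ifs <;> omega
    · split_ifs <;> omega

theorem pvLoop (A B : List Int) (i : Int) (h0 : 0 ≤ i) :
    ∀ (fuel : Nat) (k : Int), i ≤ k → k ≤ (A.length : Int) →
      ((A.length : Int) - k).toNat = fuel →
    ∀ (d : PySem.Dict Int Int) (m res : Int), pvInv A B i k d m →
    ((PySem.List.pyRange k (A.length : Int) 1).foldl (pvStepFn A B) (d, m, res)).2.2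
      = (PySem.List.pyRange (k + 1) ((A.length : Int) + 1) 1).foldl
          (fun res j =>
            let ta := PySem.List.sorted (PySem.List.slice A (some i) (some j)) (fun x => x) false
            let tb := PySem.List.sorted (PySem.List.slice B (some i) (some j)) (fun x => x) false
            if ta = tb then res + 1 else res) res := by
  intro fuel
  induction fuel with
  | zero =>
    intro k hik hkn hf d m res hinv
    have hkn' : k = (A.length : Int) := by omega
    subst hkn'
    rw [PySem.List.pyRange_one_eq_nil (le_refl _), PySem.List.pyRange_one_eq_nil (le_refl _)]
    rfl
  | succ f ih =>
    intro k hik hkn hf d m res hinv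
    have hkn' : k < (A.length : Int) := by omega
    rw [PySem.List.pyRange_one_cons hkn',
      PySem.List.pyRange_one_cons (by omega : k + 1 < (A.length : Int) + 1)]
    simp only [List.foldl_cons]
    have hinv' := pvStepFn_inv A B i k h0 hik hkn' d m res hinv
    have hiff := pvInv_zero_iff A B i (k + 1) _ _ hinv'
    have hres : (pvStepFn A B (d, m, res) k).2.2
        = if (PySem.List.sorted (PySem.List.slice A (some i) (some (k + 1))) (fun x => x) false
            = PySem.List.sorted (PySem.List.slice B (some i) (some (k + 1))) (fun x => x) false)
          then res + 1 else res := by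
      rw [pvStepFn_res]
      exact if_congr hiff rfl rfl
    have hpair : pvStepFn A B (d, m, res) k
        = ((pvStepFn A B (d, m, res) k).1,
           (pvStepFn A B (d, m, res) k).2.1,
           (pvStepFn A B (d, m, res) k).2.2) := rfl
    rw [hpair, hres]
    exact ih (k + 1) (by omega) (by omega) (by omega) _ _ _ hinv'

-- ===== VERDICT =====
theorem solution_spec : Claim_equal_solution := by
  intro A B _
  unfold Spec_solution solution solution_alt
  refine PySem.List.foldl_congr_mem _ _ _ _ ?_
  intro res i hi
  obtain ⟨h0, hin⟩ := PySem.List.mem_pyRange_one.mp hi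
  have hsl : ∀ (L : List Int), PySem.List.slice L (some i) (some i) = [] := fun L => by
    rw [PySem.List.slice_toNat L h0 h0]
    simp
  have hinv : pvInv A B i i PySem.Dict.empty 0 :=
    ⟨PySem.Dict.nodup_keys_empty,
     fun v => by rw [hsl A, hsl B]; simp [PySem.Dict.getD_empty],
     by simp [pvZn, PySem.Dict.keys_empty]⟩
  exact (pvLoop A B i h0 ((A.length : Int) - i).toNat i (le_refl i) (by omega) rfl
    PySem.Dict.empty 0 res hinv).symm
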